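-- pv_equiv track=rewrite | github.com/jrynes/USPS_Customs_Form | SeleniumQuery.py | cleanStateValues
-- ===== SOURCE A (Python) =====
-- def cleanStateValues(stateValue):
--     stateDictionary  =states = {
--     'AK': 'Alaska',
--     'AL': 'Alabama',
--     'AR': 'Arkansas',
--     'AZ': 'Arizona',
--     'CA': 'California',
--     'CO': 'Colorado',
--     'CT': 'Connecticut',
--     'DC': 'District of Columbia',
--     'DE': 'Delaware',
--     'FL': 'Florida',
--     'GA': 'Georgia',
--     'HI': 'Hawaii',
--     'IA': 'Iowa',
--     'ID': 'Idaho',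
--     'IL': 'Illinois',
--     'IN': 'Indiana',
--     'KS': 'Kansas',
--     'KY': 'Kentucky',
--     'LA': 'Louisiana',
--     'MA': 'Massachusetts',
--     'MD': 'Maryland',
--     'ME': 'Maine',
--     'MI': 'Michigan',
--     'MN': 'Minnesota',
--     'MO': 'Missouri',
--     'MS': 'Mississippi',
--     'MT': 'Montana',
--     'NC': 'North Carolina',
--     'ND': 'North Dakota',
--     'NE': 'Nebraska',
--     'NH': 'New Hampshire',
--     'NJ': 'New Jersey',
--     'NM': 'New Mexico',
--     'NV': 'Nevada',
--     'NY': 'New York',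
--     'OH': 'Ohio',
--     'OK': 'Oklahoma',
--     'OR': 'Oregon',
--     'PA': 'Pennsylvania',
--     'RI': 'Rhode Island',
--     'SC': 'South Carolina',
--     'SD': 'South Dakota',
--     'TN': 'Tennessee',
--     'TX': 'Texas',
--     'UT': 'Utah',
--     'VA': 'Virginia',
--     'VT': 'Vermont',
--     'WA': 'Washington',
--     'WI': 'Wisconsin',
--     'WV': 'West Virginia',
--     'WY': 'Wyoming'
-- }
--     apoDictionary = {"AE": "Armed Forces Europe"}
--     stateValue_Upper = str(stateValue).upper()
--     #If the stateValue is from an APO, it will have different formatting - Account for that case here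
--     for key, value in apoDictionary.items():
--         formattedString = key + " - " + value
--         if stateValue_Upper == key or stateValue == value:
--             return formattedString
--         #Maybe the state value input already matches - if so, return the state value
--         elif stateValue == formattedString:
--             return formattedString
--
--     for key, value in stateDictionary.items():
--         # First check if the stateValue equals a formatted string from the dictionary key value pairs
--         # If so, its formatted correctly for the drop-down menu - No need to process further
--         formattedString = key + " - " + str(value).upper()
--         # Maybe the state value input already matches - if so, return the state value
--         if stateValue_Upper == formattedString:
--             return stateValue_Upper
--         #Check if the stateValue is in the Key value only, or in the dictionary values only
--         #If so, return the formatted string name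
--         elif str(stateValue_Upper).upper() == key or str(stateValue).upper() == str(value).upper():
--             return formattedString
-- ===== SOURCE B (Python) =====
-- # B keeps only the 51 target dropdown strings and scans them once, matching the
-- # input against the whole string, its 2-letter prefix, or the name after " - ".
-- _FORMATTED = [
--     'AK - ALASKA', 'AL - ALABAMA', 'AR - ARKANSAS', 'AZ - ARIZONA',
--     'CA - CALIFORNIA', 'CO - COLORADO', 'CT - CONNECTICUT',
--     'DC - DISTRICT OF COLUMBIA', 'DE - DELAWARE', 'FL - FLORIDA',
--     'GA - GEORGIA', 'HI - HAWAII', 'IA - IOWA', 'ID - IDAHO',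
--     'IL - ILLINOIS', 'IN - INDIANA', 'KS - KANSAS', 'KY - KENTUCKY',
--     'LA - LOUISIANA', 'MA - MASSACHUSETTS', 'MD - MARYLAND', 'ME - MAINE',
--     'MI - MICHIGAN', 'MN - MINNESOTA', 'MO - MISSOURI', 'MS - MISSISSIPPI',
--     'MT - MONTANA', 'NC - NORTH CAROLINA', 'ND - NORTH DAKOTA',
--     'NE - NEBRASKA', 'NH - NEW HAMPSHIRE', 'NJ - NEW JERSEY',
--     'NM - NEW MEXICO', 'NV - NEVADA', 'NY - NEW YORK', 'OH - OHIO',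
--     'OK - OKLAHOMA', 'OR - OREGON', 'PA - PENNSYLVANIA',
--     'RI - RHODE ISLAND', 'SC - SOUTH CAROLINA', 'SD - SOUTH DAKOTA',
--     'TN - TENNESSEE', 'TX - TEXAS', 'UT - UTAH', 'VA - VIRGINIA',
--     'VT - VERMONT', 'WA - WASHINGTON', 'WI - WISCONSIN',
--     'WV - WEST VIRGINIA', 'WY - WYOMING',
-- ]
--
--
-- def cleanStateValues(stateValue):
--     u = str(stateValue).upper()
--     # APO special case keeps the original's case-sensitive comparisons
--     if u == "AE" or stateValue == "Armed Forces Europe" \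
--             or stateValue == "AE - Armed Forces Europe":
--         return "AE - Armed Forces Europe"
--     return next((f for f in _FORMATTED if u == f or u == f[:2] or u == f[5:]),
--                 None)
-- ===== Notes on version B (the rewrite author's own statement) =====
-- stated objective: faster
-- what changed: B drops the abbreviation-to-name dictionary entirely and scans a single precomputed list of the 51 final dropdown strings, matching the uppercased input against each whole string, its 2-letter prefix or its name suffix, instead of A's loop that re-concatenates and re-uppercases a formatted string from every key/value pair on every call.
import Mathlib
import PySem

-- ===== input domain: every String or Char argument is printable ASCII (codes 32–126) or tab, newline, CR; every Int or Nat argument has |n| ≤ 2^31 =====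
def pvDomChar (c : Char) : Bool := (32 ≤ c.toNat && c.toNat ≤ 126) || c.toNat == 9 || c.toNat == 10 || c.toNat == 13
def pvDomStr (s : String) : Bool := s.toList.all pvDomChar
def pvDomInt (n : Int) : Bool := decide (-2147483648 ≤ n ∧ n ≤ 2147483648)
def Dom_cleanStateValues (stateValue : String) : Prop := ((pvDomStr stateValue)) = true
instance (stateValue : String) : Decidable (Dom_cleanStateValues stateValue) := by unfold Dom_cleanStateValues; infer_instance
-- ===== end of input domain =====

-- B keeps only the 51 final dropdown strings and scans them by whole-string /
-- prefix / suffix match instead of A's key-value dictionary rebuild; same result proved.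

-- ===== PORT A =====
def pvStatesA : List (String × String) := [
  ("AK", "Alaska"),
  ("AL", "Alabama"),
  ("AR", "Arkansas"),
  ("AZ", "Arizona"),
  ("CA", "California"),
  ("CO", "Colorado"),
  ("CT", "Connecticut"),
  ("DC", "District of Columbia"),
  ("DE", "Delaware"),
  ("FL", "Florida"),
  ("GA", "Georgia"),
  ("HI", "Hawaii"),
  ("IA", "Iowa"),
  ("ID", "Idaho"),
  ("IL", "Illinois"),
  ("IN", "Indiana"),
  ("KS", "Kansas"),
  ("KY", "Kentucky"),
  ("LA", "Louisiana"),
  ("MA", "Massachusetts"),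
  ("MD", "Maryland"),
  ("ME", "Maine"),
  ("MI", "Michigan"),
  ("MN", "Minnesota"),
  ("MO", "Missouri"),
  ("MS", "Mississippi"),
  ("MT", "Montana"),
  ("NC", "North Carolina"),
  ("ND", "North Dakota"),
  ("NE", "Nebraska"),
  ("NH", "New Hampshire"),
  ("NJ", "New Jersey"),
  ("NM", "New Mexico"),
  ("NV", "Nevada"),
  ("NY", "New York"),
  ("OH", "Ohio"),
  ("OK", "Oklahoma"),
  ("OR", "Oregon"),
  ("PA", "Pennsylvania"),
  ("RI", "Rhode Island"),
  ("SC", "South Carolina"),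
  ("SD", "South Dakota"),
  ("TN", "Tennessee"),
  ("TX", "Texas"),
  ("UT", "Utah"),
  ("VA", "Virginia"),
  ("VT", "Vermont"),
  ("WA", "Washington"),
  ("WI", "Wisconsin"),
  ("WV", "West Virginia"),
  ("WY", "Wyoming")]

def pvApoA : List (String × String) := [("AE", "Armed Forces Europe")]

-- 'for key, value in apoDictionary.items(): …' with its two early returns
def pvApoLoop (stateValue stateValue_Upper : String) : List (String × String) → Option String
  | [] => none
  | (key, value) :: rest =>
    if stateValue_Upper = key ∨ stateValue = value then some (key ++ " - " ++ value)
    else if stateValue = key ++ " - " ++ value then some (key ++ " - " ++ value)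
    else pvApoLoop stateValue stateValue_Upper rest

-- 'for key, value in stateDictionary.items(): …' with its two early returns
def pvStateLoopA (stateValue stateValue_Upper : String) : List (String × String) → Option String
  | [] => none
  | (key, value) :: rest =>
    if stateValue_Upper = key ++ " - " ++ PySem.Str.upper value then some stateValue_Upper
    else if PySem.Str.upper stateValue_Upper = key ∨ PySem.Str.upper stateValue = PySem.Str.upper value then
      some (key ++ " - " ++ PySem.Str.upper value)
    else pvStateLoopA stateValue stateValue_Upper rest

def cleanStateValues (stateValue : String) : Option String :=
  let stateValue_Upper := PySem.Str.upper stateValue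
  match pvApoLoop stateValue stateValue_Upper pvApoA with
  | some r => some r
  | none => pvStateLoopA stateValue stateValue_Upper pvStatesA

-- ===== PORT B =====
def pvFormattedB : List String := [
  "AK - ALASKA", "AL - ALABAMA", "AR - ARKANSAS", "AZ - ARIZONA",
  "CA - CALIFORNIA", "CO - COLORADO", "CT - CONNECTICUT",
  "DC - DISTRICT OF COLUMBIA", "DE - DELAWARE", "FL - FLORIDA",
  "GA - GEORGIA", "HI - HAWAII", "IA - IOWA", "ID - IDAHO",
  "IL - ILLINOIS", "IN - INDIANA", "KS - KANSAS", "KY - KENTUCKY",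
  "LA - LOUISIANA", "MA - MASSACHUSETTS", "MD - MARYLAND", "ME - MAINE",
  "MI - MICHIGAN", "MN - MINNESOTA", "MO - MISSOURI", "MS - MISSISSIPPI",
  "MT - MONTANA", "NC - NORTH CAROLINA", "ND - NORTH DAKOTA",
  "NE - NEBRASKA", "NH - NEW HAMPSHIRE", "NJ - NEW JERSEY",
  "NM - NEW MEXICO", "NV - NEVADA", "NY - NEW YORK", "OH - OHIO",
  "OK - OKLAHOMA", "OR - OREGON", "PA - PENNSYLVANIA",
  "RI - RHODE ISLAND", "SC - SOUTH CAROLINA", "SD - SOUTH DAKOTA",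
  "TN - TENNESSEE", "TX - TEXAS", "UT - UTAH", "VA - VIRGINIA",
  "VT - VERMONT", "WA - WASHINGTON", "WI - WISCONSIN",
  "WV - WEST VIRGINIA", "WY - WYOMING"]

-- 'next((f for f in _FORMATTED if u == f or u == f[:2] or u == f[5:]), None)'
def cleanStateValues_alt (stateValue : String) : Option String :=
  let u := PySem.Str.upper stateValue
  if u = "AE" ∨ stateValue = "Armed Forces Europe" ∨ stateValue = "AE - Armed Forces Europe" then
    some "AE - Armed Forces Europe"
  else
    pvFormattedB.find? (fun f =>
      u = f ∨ u = PySem.Str.slice f none (some 2) ∨ u = PySem.Str.slice f (some 5) none)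

-- ===== PRECONDITION & SPEC =====
def Spec_cleanStateValues (stateValue : String) (out : Option String) : Prop := out = cleanStateValues_alt stateValue
instance (stateValue : String) (out : Option String) : Decidable (Spec_cleanStateValues stateValue out) := by unfold Spec_cleanStateValues; infer_instance

-- ===== CLAIM (what is proved, stated in full; the proofs are below) =====
def Claim_equal_cleanStateValues : Prop := ∀ (stateValue : String), Dom_cleanStateValues stateValue → Spec_cleanStateValues stateValue (cleanStateValues stateValue)

-- ===== LEMMAS AND PROOFS =====
set_option maxRecDepth 10000
set_option maxHeartbeats 1000000

lemma pv_upperChar_idem (c : Char) :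
    PySem.Chars.upperChar (PySem.Chars.upperChar c) = PySem.Chars.upperChar c := by
  unfold PySem.Chars.upperChar PySem.Chars.islower
  split_ifs with h1 h2 <;> try rfl
  exfalso
  simp only [Bool.and_eq_true, decide_eq_true_eq, Char.le_def, Char.reduceVal] at h1 h2
  have hv1 : 97 ≤ c.toNat := by exact_mod_cast h1.1
  have hv2 : c.toNat ≤ 122 := by exact_mod_cast h1.2
  have hvalid : (c.toNat - 32).isValidChar := by constructor; omega
  have ht : (Char.ofNat (c.toNat - 32)).toNat = c.toNat - 32 := by
    rw [Char.toNat_ofNat, if_pos hvalid]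
  have h2a : 97 ≤ (Char.ofNat (c.toNat - 32)).toNat := by exact_mod_cast h2.1
  omega

lemma pv_upper_idem (s : String) :
    PySem.Str.upper (PySem.Str.upper s) = PySem.Str.upper s := by
  unfold PySem.Str.upper PySem.Chars.upper
  rw [String.toList_ofList, List.map_map]
  exact congrArg _ (List.map_congr_left (fun c _ => pv_upperChar_idem c))

-- B's formatted list is A's state table rendered 'KEY - NAMEUPPER'
lemma pv_formatted_eq :
    pvFormattedB = pvStatesA.map (fun p => p.1 ++ " - " ++ PySem.Str.upper p.2) := by decide

-- slicing 'k ++ " - " ++ V' at [:2] gives back the 2-letter key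
lemma pv_slice_take (k V : String) (hk : k.toList.length = 2) :
    PySem.Str.slice (k ++ " - " ++ V) none (some 2) = k := by
  apply String.toList_injective
  have h2 : ((2 : Int)) = ((2 : Nat) : Int) := by norm_num
  have hsplit : (k ++ " - " ++ V).toList = k.toList ++ (" - ".toList ++ V.toList) := by
    simp [List.append_assoc]
  simp only [PySem.Str.slice, String.toList_ofList, PySem.Chars.slice_eq_listSlice, h2,
    PySem.List.slice_to_natCast, hsplit]
  exact List.take_left' hk

-- slicing it at [5:] gives back the name part
lemma pv_slice_drop (k V : String) (hk : k.toList.length = 2) :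
    PySem.Str.slice (k ++ " - " ++ V) (some 5) none = V := by
  apply String.toList_injective
  have h5 : ((5 : Int)) = ((5 : Nat) : Int) := by norm_num
  have hlen : (k.toList ++ " - ".toList).length = 5 := by
    simp [hk]
  have hsplit : (k ++ " - " ++ V).toList = (k.toList ++ " - ".toList) ++ V.toList := by
    simp
  simp only [PySem.Str.slice, String.toList_ofList, PySem.Chars.slice_eq_listSlice, h5,
    PySem.List.slice_from_natCast, hsplit]
  exact List.drop_left' hlen

-- A's key-value scan equals B's find? over the rendered strings, entry for entry
lemma pv_scan_eq (s u : String) (hu : PySem.Str.upper u = u) (hsu : PySem.Str.upper s = u)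
    (L : List (String × String)) (hL : ∀ p ∈ L, (p.1 : String).toList.length = 2) :
    pvStateLoopA s u L =
      (L.map (fun p => p.1 ++ " - " ++ PySem.Str.upper p.2)).find? (fun f =>
        u = f ∨ u = PySem.Str.slice f none (some 2) ∨ u = PySem.Str.slice f (some 5) none) := by
  induction L with
  | nil => simp [pvStateLoopA]
  | cons p rest ih =>
    obtain ⟨k, v⟩ := p
    have hk : k.toList.length = 2 := hL (k, v) (List.mem_cons_self)
    have hrest : ∀ q ∈ rest, (q.1 : String).toList.length = 2 :=
      fun q hq => hL q (List.mem_cons_of_mem _ hq)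
    simp only [List.map_cons, List.find?_cons, pvStateLoopA, hu, hsu,
      pv_slice_take k (PySem.Str.upper v) hk, pv_slice_drop k (PySem.Str.upper v) hk]
    by_cases h1 : u = k ++ " - " ++ PySem.Str.upper v
    · simp [h1]
    · by_cases h2 : u = k ∨ u = PySem.Str.upper v
      · simp only [if_neg h1, if_pos h2]
        have : (decide (u = k ++ " - " ++ PySem.Str.upper v) || (decide (u = k) || decide (u = PySem.Str.upper v))) = true := by
          rcases h2 with h | h <;> simp [h]
        simp [this]
      · simp only [if_neg h1, if_neg h2]
        have hcond : (decide (u = k ++ " - " ++ PySem.Str.upper v) || (decide (u = k) || decide (u = PySem.Str.upper v))) = false := by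
          push Not at h2
          simp [h1, h2.1, h2.2]
        simp [hcond, ih hrest]

lemma pv_keys_len : ∀ p ∈ pvStatesA, (p.1 : String).toList.length = 2 := by decide

-- ===== VERDICT (by name: the statement is the Claim_ definition above) =====
theorem cleanStateValues_spec : Claim_equal_cleanStateValues := by
  unfold Claim_equal_cleanStateValues
  intro s _
  unfold Spec_cleanStateValues cleanStateValues cleanStateValues_alt
  have happ : ("AE" : String) ++ " - " ++ "Armed Forces Europe" = "AE - Armed Forces Europe" := rfl
  by_cases h1 : PySem.Str.upper s = "AE" ∨ s = "Armed Forces Europe"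
  · simp only [pvApoA, pvApoLoop, happ, if_pos h1, if_pos (by tauto : PySem.Str.upper s = "AE" ∨ s = "Armed Forces Europe" ∨ s = "AE - Armed Forces Europe")]
  · by_cases h2 : s = "AE - Armed Forces Europe"
    · simp only [pvApoA, pvApoLoop, happ, if_neg h1, if_pos h2, if_pos (by tauto : PySem.Str.upper s = "AE" ∨ s = "Armed Forces Europe" ∨ s = "AE - Armed Forces Europe")]
    · simp only [pvApoA, pvApoLoop, happ, if_neg h1, if_neg h2, if_neg (by tauto : ¬ (PySem.Str.upper s = "AE" ∨ s = "Armed Forces Europe" ∨ s = "AE - Armed Forces Europe"))]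
      rw [pv_formatted_eq]
      exact pv_scan_eq s (PySem.Str.upper s) (pv_upper_idem s) rfl pvStatesA pv_keys_len
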